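-- pv_equiv track=rewrite | github.com/thomascassidyzm/ssi-dashboard-v7 | vfs/courses/ita_for_eng_30seeds/generate_baskets_batch1_full.py | extract_d_phrases
-- ===== SOURCE A (Python) =====
-- def extract_d_phrases(e_phrases, operative_lego):
--     """Extract 2-5 word windows containing the operative LEGO"""
--     d = {"2": [], "3": [], "4": [], "5": []}
--
--     for ep_t, ep_k in e_phrases:
--         t_clean = ep_t.replace('.', '').replace('?', '').replace('!', '').replace(',', '')
--         k_clean = ep_k.replace('.', '').replace('?', '').replace('!', '').replace(',', '')
--         t_words = t_clean.split()
--         k_words = k_clean.split()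
--
--         for size in [2, 3, 4, 5]:
--             if len(d[str(size)]) >= 2:
--                 continue
--             for i in range(len(t_words) - size + 1):
--                 win_t = ' '.join(t_words[i:i+size])
--                 win_k = ' '.join(k_words[i:i+size])
--                 if operative_lego.lower() in win_t.lower():
--                     phrase = [win_t, win_k]
--                     if phrase not in d[str(size)]:
--                         d[str(size)].append(phrase)
--                         if len(d[str(size)]) >= 2:
--                             break
--     return d
-- ===== SOURCE B (Python) =====
-- def extract_d_phrases(e_phrases, operative_lego):
--     """Extract 2-5 word windows containing the operative LEGO"""
--     lego = operative_lego.lower()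
--
--     def words(s):
--         return s.replace('.', '').replace('?', '').replace('!', '').replace(',', '').split()
--
--     pairs = [(words(t), words(k)) for t, k in e_phrases]
--
--     d = {}
--     for size in [2, 3, 4, 5]:
--         # generate every candidate window pair, in phrase-then-position order
--         cands = []
--         for t_words, k_words in pairs:
--             for i in range(len(t_words) - size + 1):
--                 win_t = ' '.join(t_words[i:i + size])
--                 if lego in win_t.lower():
--                     cands.append((win_t, ' '.join(k_words[i:i + size])))
--         # dedup preserving first occurrence, keep the first two
--         seen = set()
--         out = []
--         for c in cands:
--             if c not in seen:
--                 seen.add(c)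
--                 out.append([c[0], c[1]])
--         d[str(size)] = out[:2]
--     return d
-- ===== Notes on version B (the rewrite author's own statement) =====
-- stated objective: alternative
-- what changed: Replaces A's stateful interleaved loop (dict of per-size accumulators with continue/early-break and inline list-membership dedup) by an independent per-size pipeline: generate all matching window pairs in order, then dedup with a set preserving first occurrence, then truncate to two.
import Mathlib
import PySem

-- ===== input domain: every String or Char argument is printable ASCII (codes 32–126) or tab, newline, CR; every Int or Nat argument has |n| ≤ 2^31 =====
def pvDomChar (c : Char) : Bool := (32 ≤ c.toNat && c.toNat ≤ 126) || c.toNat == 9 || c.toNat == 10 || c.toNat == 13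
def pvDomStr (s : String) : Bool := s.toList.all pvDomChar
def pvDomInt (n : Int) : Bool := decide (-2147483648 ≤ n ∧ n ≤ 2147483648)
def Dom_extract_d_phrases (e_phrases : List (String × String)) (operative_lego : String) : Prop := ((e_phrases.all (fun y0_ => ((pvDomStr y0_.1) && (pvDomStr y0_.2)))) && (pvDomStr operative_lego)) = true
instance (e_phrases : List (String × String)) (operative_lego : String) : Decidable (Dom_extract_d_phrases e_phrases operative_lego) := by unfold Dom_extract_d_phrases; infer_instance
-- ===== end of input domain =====

-- B replaces A's interleaved per-phrase loop over a dict of capped accumulators (continue/early-break,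
-- inline membership dedup) by an independent per-size pipeline: generate all matching windows, dedup
-- with a set keeping first occurrences, truncate to two.  Objective: alternative decomposition.

-- ===== PORT A =====
-- shared string helpers (used verbatim by both Pythons): punctuation stripping and ' '.join of a slice
def pvClean (s : String) : String :=
  PySem.Str.replace (PySem.Str.replace (PySem.Str.replace (PySem.Str.replace s "." "") "?" "") "!" "") "," ""

def pvWin (ws : List String) (i size : Int) : String :=
  PySem.Str.join " " (PySem.List.slice ws (some i) (some (i + size)))

-- A's innermost `for i in range(...)` with its dedup-append and `break` at two elements
def pvGoA (operative_lego : String) (t_words k_words : List String) (size : Int)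
    (acc : List (List String)) : List Int → List (List String)
  | [] => acc
  | i :: is =>
    if PySem.Str.isIn (PySem.Str.lower operative_lego) (PySem.Str.lower (pvWin t_words i size)) then
      if [pvWin t_words i size, pvWin k_words i size] ∈ acc then
        pvGoA operative_lego t_words k_words size acc is
      else
        let acc' := acc ++ [[pvWin t_words i size, pvWin k_words i size]]
        if 2 ≤ acc'.length then acc'  -- `break`
        else pvGoA operative_lego t_words k_words size acc' is
    else pvGoA operative_lego t_words k_words size acc is

-- body of A's `for size in [2,3,4,5]`: keys "2".."5" are always present, so d[str(size)] = getD
def pvSizeStep (operative_lego : String) (t_words k_words : List String)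
    (d : PySem.Dict String (List (List String))) (size : Int) :
    PySem.Dict String (List (List String)) :=
  let cur := d.getD (PySem.Int.toStr size) []
  if 2 ≤ cur.length then d  -- `continue`
  else d.insert (PySem.Int.toStr size)
    (pvGoA operative_lego t_words k_words size cur
      (PySem.List.pyRange 0 ((t_words.length : Int) - size + 1) 1))

def pvPhraseStep (operative_lego : String) (d : PySem.Dict String (List (List String)))
    (ep : String × String) : PySem.Dict String (List (List String)) :=
  let t_words := PySem.Str.split₀ (pvClean ep.1)
  let k_words := PySem.Str.split₀ (pvClean ep.2)
  ([2, 3, 4, 5] : List Int).foldl (pvSizeStep operative_lego t_words k_words) d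

def extract_d_phrases (e_phrases : List (String × String)) (operative_lego : String) :
    List (String × List (List String)) :=
  (e_phrases.foldl (pvPhraseStep operative_lego)
    (PySem.Dict.ofList [("2", []), ("3", []), ("4", []), ("5", [])])).items

-- ===== PORT B =====
-- all candidate windows of one phrase for one size, in position order (lego arrives pre-lowered)
def pvCandsPhrase (lego : String) (size : Int) (tw kw : List String) : List (String × String) :=
  (PySem.List.pyRange 0 ((tw.length : Int) - size + 1) 1).filterMap (fun i =>
    if PySem.Str.isIn lego (PySem.Str.lower (pvWin tw i size)) then
      some (pvWin tw i size, pvWin kw i size)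
    else none)

-- Source B's dedup loop body: seen is a set of pairs, out collects [t, k] lists in first-occurrence order
def pvDedupStep (st : PySem.Set (String × String) × List (List String)) (c : String × String) :
    PySem.Set (String × String) × List (List String) :=
  if st.1.contains c then st else (st.1.add c, st.2 ++ [[c.1, c.2]])

def extract_d_phrases_alt (e_phrases : List (String × String)) (operative_lego : String) :
    List (String × List (List String)) :=
  let lego := PySem.Str.lower operative_lego
  let pairs := e_phrases.map (fun p => (PySem.Str.split₀ (pvClean p.1), PySem.Str.split₀ (pvClean p.2)))
  ([2, 3, 4, 5] : List Int).map (fun size =>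
    let cands := pairs.flatMap (fun p => pvCandsPhrase lego size p.1 p.2)
    (PySem.Int.toStr size, (cands.foldl pvDedupStep (PySem.Set.empty, [])).2.take 2))

-- ===== PRECONDITION & SPEC =====
def Spec_extract_d_phrases (e_phrases : List (String × String)) (operative_lego : String) (out : List (String × List (List String))) : Prop := out = extract_d_phrases_alt e_phrases operative_lego
instance (e_phrases : List (String × String)) (operative_lego : String) (out : List (String × List (List String))) : Decidable (Spec_extract_d_phrases e_phrases operative_lego out) := by unfold Spec_extract_d_phrases; infer_instance

-- ===== CLAIM (what is proved, stated in full; the proofs are below) =====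
def Claim_equal_extract_d_phrases : Prop := ∀ (e_phrases : List (String × String)) (operative_lego : String), Dom_extract_d_phrases e_phrases operative_lego → Spec_extract_d_phrases e_phrases operative_lego (extract_d_phrases e_phrases operative_lego)

-- ===== LEMMAS AND PROOFS =====

-- proof-side abstractions
def pvListify (c : String × String) : List String := [c.1, c.2]

-- capped dedup-append: what A effectively does to one size's accumulator with a candidate stream
def pvAdd2 (acc : List (List String)) (cs : List (List String)) : List (List String) :=
  cs.foldl (fun a c => if 2 ≤ a.length then a else if c ∈ a then a else a ++ [c]) acc

-- order-preserving dedup of cs, excluding anything in acc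
def pvDedupEx (acc : List (List String)) : List (List String) → List (List String)
  | [] => []
  | c :: cs => if c ∈ acc then pvDedupEx acc cs else c :: pvDedupEx (acc ++ [c]) cs

-- A's whole per-phrase-per-size update
def pvF (operative_lego : String) (ep : String × String) (s : Int) (a : List (List String)) :
    List (List String) :=
  let tw := PySem.Str.split₀ (pvClean ep.1)
  if 2 ≤ a.length then a
  else pvGoA operative_lego tw (PySem.Str.split₀ (pvClean ep.2)) s a
    (PySem.List.pyRange 0 ((tw.length : Int) - s + 1) 1)

lemma pvAdd2_full (acc : List (List String)) (cs : List (List String)) (h : 2 ≤ acc.length) :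
    pvAdd2 acc cs = acc := by
  induction cs with
  | nil => rfl
  | cons c cs ih => simp [pvAdd2, List.foldl, h] at ih ⊢; simpa [pvAdd2, h] using ih

lemma pvAdd2_take (cs : List (List String)) : ∀ (acc : List (List String)), acc.length ≤ 2 →
    pvAdd2 acc cs = (acc ++ pvDedupEx acc cs).take 2 := by
  induction cs with
  | nil =>
    intro acc h
    simp [pvAdd2, pvDedupEx, List.take_of_length_le h]
  | cons c cs ih =>
    intro acc h
    by_cases h2 : 2 ≤ acc.length
    · rw [pvAdd2_full _ _ h2, List.take_append_of_le_length h2, List.take_of_length_le h]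
    · by_cases hc : c ∈ acc
      · have e : pvAdd2 acc (c :: cs) = pvAdd2 acc cs := by
          simp [pvAdd2, List.foldl_cons, h2, hc]
        rw [e, ih acc h]
        simp [pvDedupEx, hc]
      · have e : pvAdd2 acc (c :: cs) = pvAdd2 (acc ++ [c]) cs := by
          simp [pvAdd2, List.foldl_cons, h2, hc]
        rw [e, ih (acc ++ [c]) (by simp; omega)]
        simp [pvDedupEx, hc, List.append_assoc]

lemma pvAdd2_len (acc : List (List String)) (cs : List (List String)) (h : acc.length ≤ 2) :
    (pvAdd2 acc cs).length ≤ 2 := by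
  rw [pvAdd2_take cs acc h]; simp

lemma pvGoA_eq (lg : String) (tw kw : List String) (s : Int) (is : List Int) :
    ∀ (acc : List (List String)), acc.length < 2 →
    pvGoA lg tw kw s acc is =
      pvAdd2 acc ((is.filterMap (fun i =>
        if PySem.Str.isIn (PySem.Str.lower lg) (PySem.Str.lower (pvWin tw i s)) then
          some (pvWin tw i s, pvWin kw i s)
        else none)).map pvListify) := by
  induction is with
  | nil => intro acc h; simp only [List.filterMap_nil, List.map_nil]; rfl
  | cons i is ih =>
    intro acc h
    have hne : ¬ (2 ≤ acc.length) := by omega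
    by_cases hin : PySem.Str.isIn (PySem.Str.lower lg) (PySem.Str.lower (pvWin tw i s)) = true
    · rw [List.filterMap_cons, if_pos hin]
      have hstep : pvAdd2 acc ([pvWin tw i s, pvWin kw i s] ::
          (is.filterMap (fun i =>
            if PySem.Str.isIn (PySem.Str.lower lg) (PySem.Str.lower (pvWin tw i s)) then
              some (pvWin tw i s, pvWin kw i s)
            else none)).map pvListify) =
          pvAdd2 (if [pvWin tw i s, pvWin kw i s] ∈ acc then acc
            else acc ++ [[pvWin tw i s, pvWin kw i s]])
          ((is.filterMap (fun i =>
            if PySem.Str.isIn (PySem.Str.lower lg) (PySem.Str.lower (pvWin tw i s)) then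
              some (pvWin tw i s, pvWin kw i s)
            else none)).map pvListify) := by
        simp only [pvAdd2, List.foldl_cons, if_neg hne]
      by_cases hc : [pvWin tw i s, pvWin kw i s] ∈ acc
      · have e : pvGoA lg tw kw s acc (i :: is) = pvGoA lg tw kw s acc is := by
          simp only [pvGoA, if_pos hin, if_pos hc]
        rw [e, ih acc h, List.map_cons]
        simp only [pvListify]
        rw [hstep, if_pos hc]
      · by_cases h1 : 2 ≤ (acc ++ [[pvWin tw i s, pvWin kw i s]]).length
        · have e : pvGoA lg tw kw s acc (i :: is) = acc ++ [[pvWin tw i s, pvWin kw i s]] := by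
            simp only [pvGoA, if_pos hin, if_neg hc, if_pos h1]
        
          rw [e, List.map_cons]
          simp only [pvListify]
          rw [hstep, if_neg hc, pvAdd2_full _ _ h1]
        · have e : pvGoA lg tw kw s acc (i :: is) =
              pvGoA lg tw kw s (acc ++ [[pvWin tw i s, pvWin kw i s]]) is := by
            simp only [pvGoA, if_pos hin, if_neg hc, if_neg h1]
          rw [e, ih (acc ++ [[pvWin tw i s, pvWin kw i s]]) (by simp at h1 ⊢; omega),
            List.map_cons]
          simp only [pvListify]
          rw [hstep, if_neg hc]
    · have e : pvGoA lg tw kw s acc (i :: is) = pvGoA lg tw kw s acc is := by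
        simp only [pvGoA, if_neg hin]
      rw [e, ih acc h, List.filterMap_cons, if_neg hin]

lemma pvF_eq (lg : String) (ep : String × String) (s : Int) (a : List (List String))
    (h : a.length ≤ 2) :
    pvF lg ep s a = pvAdd2 a ((pvCandsPhrase (PySem.Str.lower lg) s
      (PySem.Str.split₀ (pvClean ep.1)) (PySem.Str.split₀ (pvClean ep.2))).map pvListify) := by
  by_cases h2 : 2 ≤ a.length
  · rw [pvAdd2_full _ _ h2]
    simp [pvF, h2]
  · simp only [pvF, pvCandsPhrase, if_neg h2]
    exact pvGoA_eq lg _ _ s _ a (by omega)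

lemma pvFoldF_eq (lg : String) (s : Int) (phs : List (String × String)) :
    ∀ (acc : List (List String)), acc.length ≤ 2 →
    phs.foldl (fun a ep => pvF lg ep s a) acc =
      pvAdd2 acc ((phs.flatMap (fun ep => pvCandsPhrase (PySem.Str.lower lg) s
        (PySem.Str.split₀ (pvClean ep.1)) (PySem.Str.split₀ (pvClean ep.2)))).map pvListify) := by
  induction phs with
  | nil => intro acc h; simp [pvAdd2]
  | cons p ps ih =>
    intro acc h
    rw [List.foldl_cons, pvF_eq lg p s acc h,
      ih _ (pvAdd2_len _ _ h)]
    simp only [pvAdd2, List.flatMap_cons, List.map_append, List.foldl_append]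

lemma pvDedup_eq (cs : List (String × String)) :
    ∀ (seen : PySem.Set (String × String)) (out : List (List String)),
    (∀ c, seen.contains c = decide (pvListify c ∈ out)) →
    (cs.foldl pvDedupStep (seen, out)).2 = out ++ pvDedupEx out (cs.map pvListify) := by
  induction cs with
  | nil => intro seen out hinv; simp [pvDedupEx]
  | cons c cs ih =>
    intro seen out hinv
    rw [List.foldl_cons]
    by_cases hc : seen.contains c = true
    · have hmem : pvListify c ∈ out := by have := hinv c; rw [hc] at this; simpa using this.symm
      have e : pvDedupStep (seen, out) c = (seen, out) := by
        simp only [pvDedupStep, if_pos hc]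
      rw [e, ih seen out hinv]
      simp [pvDedupEx, hmem]
    · have hmem : pvListify c ∉ out := by
        have := hinv c
        rw [Bool.not_eq_true] at hc
        rw [hc] at this
        simpa using this.symm
      have e : pvDedupStep (seen, out) c = (seen.add c, out ++ [pvListify c]) := by
        simp only [pvDedupStep, if_neg hc, pvListify]
      simp only [pvListify] at hmem
      rw [e, ih (seen.add c) (out ++ [pvListify c]) ?_]
      · simp [pvDedupEx, hmem, List.append_assoc, pvListify]
      · intro c'
        by_cases hcc : c' = c
        · subst hcc
          have h1 : (seen.add c').contains c' = true :=
            (PySem.Set.contains_iff _ _).2 (by simp [PySem.Set.mem_add])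
          rw [h1]
          simp
        · have : (seen.add c).contains c' = seen.contains c' := by
            simp only [PySem.Set.contains_eq_listContains]
            by_cases hmem2 : c' ∈ seen.add c
            · simp [PySem.Set.mem_add] at hmem2
              rcases hmem2 with hm | hm
              · simp [hm]
              · exact absurd hm hcc
            · have : c' ∉ (seen : List (String × String)) := fun hm =>
                hmem2 (by simp [PySem.Set.mem_add, hm])
              simp [hmem2, this]
          rw [this, hinv c']
          have : pvListify c' ≠ pvListify c := by
            simp [pvListify]
            intro h1 h2
            exact hcc (Prod.ext h1 h2)
          simp [this]

-- dict plumbing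
lemma pvSizeStep_getD_ne (lg : String) (tw kw : List String)
    (d : PySem.Dict String (List (List String))) (s : Int) (key : String)
    (h : key ≠ PySem.Int.toStr s) :
    (pvSizeStep lg tw kw d s).getD key [] = d.getD key [] := by
  simp only [pvSizeStep]
  split
  · rfl
  · simp [PySem.Dict.getD_insert, h]

lemma pvSizeStep_getD_self (lg : String) (tw kw : List String)
    (d : PySem.Dict String (List (List String))) (s : Int) :
    (pvSizeStep lg tw kw d s).getD (PySem.Int.toStr s) [] =
      (if 2 ≤ (d.getD (PySem.Int.toStr s) []).length then d.getD (PySem.Int.toStr s) []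
       else pvGoA lg tw kw s (d.getD (PySem.Int.toStr s) [])
         (PySem.List.pyRange 0 ((tw.length : Int) - s + 1) 1)) := by
  simp only [pvSizeStep]
  split
  · simp_all
  · simp_all

lemma pvSizeStep_keys (lg : String) (tw kw : List String)
    (d : PySem.Dict String (List (List String))) (s : Int)
    (h : d.contains (PySem.Int.toStr s) = true) :
    (pvSizeStep lg tw kw d s).keys = d.keys := by
  simp only [pvSizeStep]
  split
  · rfl
  · simp [pysem, h]

lemma pvSizeStepKeysL (lg : String) (tw kw : List String)
    (d : PySem.Dict String (List (List String))) (s : Int)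
    (hs : s = 2 ∨ s = 3 ∨ s = 4 ∨ s = 5) (h : d.keys = ["2", "3", "4", "5"]) :
    (pvSizeStep lg tw kw d s).keys = ["2", "3", "4", "5"] := by
  have hc : d.contains (PySem.Int.toStr s) = true := by
    rcases hs with rfl | rfl | rfl | rfl <;>
      simp [PySem.Dict.contains_iff_mem_keys, h] <;> decide
  rw [pvSizeStep_keys _ _ _ _ _ hc]
  exact h

lemma pvPhraseStep_keys (lg : String) (d : PySem.Dict String (List (List String)))
    (ep : String × String) (h : d.keys = ["2", "3", "4", "5"]) :
    (pvPhraseStep lg d ep).keys = ["2", "3", "4", "5"] := by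
  simp only [pvPhraseStep, List.foldl]
  exact pvSizeStepKeysL lg _ _ _ 5 (by norm_num)
    (pvSizeStepKeysL lg _ _ _ 4 (by norm_num)
      (pvSizeStepKeysL lg _ _ _ 3 (by norm_num)
        (pvSizeStepKeysL lg _ _ _ 2 (by norm_num) h)))

lemma pvPhraseStep_getD (lg : String) (d : PySem.Dict String (List (List String)))
    (ep : String × String) (s : Int) (hs : s = 2 ∨ s = 3 ∨ s = 4 ∨ s = 5) :
    (pvPhraseStep lg d ep).getD (PySem.Int.toStr s) [] =
      pvF lg ep s (d.getD (PySem.Int.toStr s) []) := by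
  simp only [pvPhraseStep, List.foldl]
  rcases hs with rfl | rfl | rfl | rfl
  · rw [pvSizeStep_getD_ne lg _ _ _ 5 (PySem.Int.toStr 2) (by decide),
      pvSizeStep_getD_ne lg _ _ _ 4 (PySem.Int.toStr 2) (by decide),
      pvSizeStep_getD_ne lg _ _ _ 3 (PySem.Int.toStr 2) (by decide),
      pvSizeStep_getD_self]
    simp only [pvF]
  · rw [pvSizeStep_getD_ne lg _ _ _ 5 (PySem.Int.toStr 3) (by decide),
      pvSizeStep_getD_ne lg _ _ _ 4 (PySem.Int.toStr 3) (by decide),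
      pvSizeStep_getD_self,
      pvSizeStep_getD_ne lg _ _ _ 2 (PySem.Int.toStr 3) (by decide)]
    simp only [pvF]
  · rw [pvSizeStep_getD_ne lg _ _ _ 5 (PySem.Int.toStr 4) (by decide),
      pvSizeStep_getD_self,
      pvSizeStep_getD_ne lg _ _ _ 3 (PySem.Int.toStr 4) (by decide),
      pvSizeStep_getD_ne lg _ _ _ 2 (PySem.Int.toStr 4) (by decide)]
    simp only [pvF]
  · rw [pvSizeStep_getD_self,
      pvSizeStep_getD_ne lg _ _ _ 4 (PySem.Int.toStr 5) (by decide),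
      pvSizeStep_getD_ne lg _ _ _ 3 (PySem.Int.toStr 5) (by decide),
      pvSizeStep_getD_ne lg _ _ _ 2 (PySem.Int.toStr 5) (by decide)]
    simp only [pvF]

lemma pvFold_keys (lg : String) (phs : List (String × String)) :
    ∀ (d : PySem.Dict String (List (List String))), d.keys = ["2", "3", "4", "5"] →
    (phs.foldl (pvPhraseStep lg) d).keys = ["2", "3", "4", "5"] := by
  induction phs with
  | nil => intro d hd; simpa using hd
  | cons p ps ih =>
    intro d hd
    rw [List.foldl_cons]
    exact ih _ (pvPhraseStep_keys lg d p hd)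

lemma pvFold_getD (lg : String) (phs : List (String × String)) (s : Int)
    (hs : s = 2 ∨ s = 3 ∨ s = 4 ∨ s = 5) :
    ∀ (d : PySem.Dict String (List (List String))), d.keys = ["2", "3", "4", "5"] →
    (phs.foldl (pvPhraseStep lg) d).getD (PySem.Int.toStr s) [] =
      phs.foldl (fun a ep => pvF lg ep s a) (d.getD (PySem.Int.toStr s) []) := by
  induction phs with
  | nil => intro d hd; rfl
  | cons p ps ih =>
    intro d hd
    simp only [List.foldl]
    rw [ih _ (pvPhraseStep_keys lg d p hd), pvPhraseStep_getD lg d p s hs]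

lemma pvItems_shape (d : PySem.Dict String (List (List String)))
    (h : d.keys = ["2", "3", "4", "5"]) :
    d.items = [("2", d.getD "2" []), ("3", d.getD "3" []),
               ("4", d.getD "4" []), ("5", d.getD "5" [])] := by
  obtain ⟨l⟩ := d
  simp only [PySem.Dict.keys] at h
  rcases l with _ | ⟨⟨k1, v1⟩, l⟩ <;> simp at h
  rcases l with _ | ⟨⟨k2, v2⟩, l⟩ <;> simp at h
  rcases l with _ | ⟨⟨k3, v3⟩, l⟩ <;> simp at h
  rcases l with _ | ⟨⟨k4, v4⟩, l⟩ <;> simp at h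
  rcases l with _ | ⟨⟨k5, v5⟩, l⟩ <;> simp at h
  obtain ⟨rfl, rfl, rfl, rfl⟩ := h
  simp [PySem.Dict.getD_eq_get?_getD, PySem.Dict.get?_mk_cons]

lemma pvComponent (lg : String) (e : List (String × String)) (s : Int)
    (hs : s = 2 ∨ s = 3 ∨ s = 4 ∨ s = 5) :
    (e.foldl (pvPhraseStep lg)
      (PySem.Dict.ofList [("2", []), ("3", []), ("4", []), ("5", [])])).getD
        (PySem.Int.toStr s) [] =
    ((((e.map (fun p => (PySem.Str.split₀ (pvClean p.1), PySem.Str.split₀ (pvClean p.2)))).flatMap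
        (fun p => pvCandsPhrase (PySem.Str.lower lg) s p.1 p.2)).foldl
        pvDedupStep (PySem.Set.empty, [])).2).take 2 := by
  have hkeys0 : (PySem.Dict.ofList
      ([("2", []), ("3", []), ("4", []), ("5", [])] :
        List (String × List (List String)))).keys = ["2", "3", "4", "5"] := by decide
  rw [pvFold_getD lg e s hs _ hkeys0]
  have hd0 : (PySem.Dict.ofList
      ([("2", []), ("3", []), ("4", []), ("5", [])] :
        List (String × List (List String)))).getD (PySem.Int.toStr s) [] = [] := by
    rcases hs with rfl | rfl | rfl | rfl <;> decide
  rw [hd0, pvFoldF_eq lg s e [] (by simp)]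
  rw [pvDedup_eq _ PySem.Set.empty [] (by intro c; simp [PySem.Set.empty])]
  rw [pvAdd2_take _ [] (by simp), List.flatMap_map]

-- ===== VERDICT (by name: the statement is the Claim_ definition above) =====
theorem extract_d_phrases_spec : Claim_equal_extract_d_phrases := by
  intro e lg _hdom
  show extract_d_phrases e lg = extract_d_phrases_alt e lg
  have hkeys0 : (PySem.Dict.ofList
      ([("2", []), ("3", []), ("4", []), ("5", [])] :
        List (String × List (List String)))).keys = ["2", "3", "4", "5"] := by decide
  unfold extract_d_phrases extract_d_phrases_alt
  rw [pvItems_shape _ (pvFold_keys lg e _ hkeys0)]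
  simp only [List.map_cons, List.map_nil]
  have t2 : PySem.Int.toStr 2 = "2" := by decide
  have t3 : PySem.Int.toStr 3 = "3" := by decide
  have t4 : PySem.Int.toStr 4 = "4" := by decide
  have t5 : PySem.Int.toStr 5 = "5" := by decide
  have c2 := pvComponent lg e 2 (by norm_num); rw [t2] at c2
  have c3 := pvComponent lg e 3 (by norm_num); rw [t3] at c3
  have c4 := pvComponent lg e 4 (by norm_num); rw [t4] at c4
  have c5 := pvComponent lg e 5 (by norm_num); rw [t5] at c5
  rw [t2, t3, t4, t5, c2, c3, c4, c5]
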